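-- pv_equiv track=rewrite | github.com/cannotcomplain/advent | advent/2022/day_2.py | result_to_hand
-- ===== SOURCE A (Python) =====
-- def result_to_hand(opponent_hand: str, result):
--     # given the opponents key, what value loses
--     losing_hands = {'rock': 'scissors',
--                    'paper': 'rock',
--                    'scissors': 'paper'}
--     outcome = {
--             'X': 'lose',
--             'Y': 'tie',
--             'Z': 'win',
--             }[result]
--
--     if outcome == 'tie':
--        my_hand = opponent_hand
--     elif outcome == 'lose':
--         my_hand = losing_hands[opponent_hand]
--     else:
--         winning_hands = {val: key for key, val in losing_hands.items()}
--         my_hand = winning_hands[opponent_hand]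
--
--     return my_hand
-- ===== SOURCE B (Python) =====
-- def result_to_hand(opponent_hand: str, result):
--     # cyclic encoding: hands[i] beats hands[i-1]; result maps to a shift
--     hands = ['rock', 'paper', 'scissors']
--     shift = {'X': -1, 'Y': 0, 'Z': 1}[result]
--     if shift == 0:
--         return opponent_hand
--     idx = {'rock': 0, 'paper': 1, 'scissors': 2}[opponent_hand]
--     return hands[(idx + shift) % 3]
-- ===== Notes on version B (the rewrite author's own statement) =====
-- stated objective: idiomatic
-- what changed: Replaces the dict of losing hands and the on-the-fly inverted winning dict with cyclic index arithmetic: result maps to a shift in {-1,0,1} and the answer is hands[(idx+shift)%3].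
import Mathlib
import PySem

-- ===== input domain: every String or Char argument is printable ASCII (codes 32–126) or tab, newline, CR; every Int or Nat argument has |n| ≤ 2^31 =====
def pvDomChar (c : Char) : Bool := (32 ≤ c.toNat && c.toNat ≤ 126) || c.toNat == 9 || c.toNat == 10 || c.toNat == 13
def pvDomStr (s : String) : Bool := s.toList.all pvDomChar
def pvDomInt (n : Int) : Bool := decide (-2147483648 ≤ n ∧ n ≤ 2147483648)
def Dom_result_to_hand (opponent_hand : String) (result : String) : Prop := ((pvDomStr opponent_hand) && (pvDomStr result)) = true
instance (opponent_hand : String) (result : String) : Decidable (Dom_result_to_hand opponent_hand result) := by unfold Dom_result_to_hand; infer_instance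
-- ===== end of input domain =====

-- B replaces the losing-hands dict and its on-the-fly inversion by cyclic index arithmetic (idiomatic; same cost).

-- ===== PORT A =====
def result_to_hand (opponent_hand : String) (result : String) : String :=
  let losing_hands : PySem.Dict String String :=
    PySem.Dict.ofList [("rock", "scissors"), ("paper", "rock"), ("scissors", "paper")]
  match (PySem.Dict.ofList [("X", "lose"), ("Y", "tie"), ("Z", "win")] : PySem.Dict String String).get? result with
  | none => ""  -- KeyError: excluded by Pre_
  | some outcome =>
    if outcome = "tie" then opponent_hand
    else if outcome = "lose" then
      match losing_hands.get? opponent_hand with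
      | none => ""  -- KeyError: excluded by Pre_
      | some h => h
    else
      let winning_hands : PySem.Dict String String :=
        PySem.Dict.ofList (losing_hands.items.map (fun p => (p.2, p.1)))
      match winning_hands.get? opponent_hand with
      | none => ""  -- KeyError: excluded by Pre_
      | some h => h

-- ===== PORT B =====
def result_to_hand_alt (opponent_hand : String) (result : String) : String :=
  let hands : List String := ["rock", "paper", "scissors"]
  match (PySem.Dict.ofList [("X", (-1 : Int)), ("Y", 0), ("Z", 1)] : PySem.Dict String Int).get? result with
  | none => ""  -- KeyError: excluded by Pre_
  | some shift =>
    if shift = 0 then opponent_hand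
    else
      match (PySem.Dict.ofList [("rock", (0 : Int)), ("paper", 1), ("scissors", 2)] : PySem.Dict String Int).get? opponent_hand with
      | none => ""  -- KeyError: excluded by Pre_
      | some idx =>
        match PySem.List.pyGet? hands (PySem.Int.mod (idx + shift) 3) with
        | none => ""  -- unreachable: 0 ≤ (idx+shift) mod 3 < 3
        | some h => h

-- ===== PRECONDITION & SPEC =====
-- Pre_ excludes exactly the inputs on which A raises KeyError: a result outside {X,Y,Z},
-- or (for a non-tie result) an opponent_hand outside {rock,paper,scissors}.
def Pre_result_to_hand (opponent_hand : String) (result : String) : Prop :=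
  (result = "X" ∨ result = "Y" ∨ result = "Z") ∧
  (result = "Y" ∨ opponent_hand = "rock" ∨ opponent_hand = "paper" ∨ opponent_hand = "scissors")
instance (opponent_hand : String) (result : String) : Decidable (Pre_result_to_hand opponent_hand result) := by
  unfold Pre_result_to_hand; infer_instance
def pvWitness_result_to_hand : String × String := ("rock", "Z")
def Spec_result_to_hand (opponent_hand : String) (result : String) (out : String) : Prop := out = result_to_hand_alt opponent_hand result
instance (opponent_hand : String) (result : String) (out : String) : Decidable (Spec_result_to_hand opponent_hand result out) := by unfold Spec_result_to_hand; infer_instance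

-- ===== CLAIM (what is proved, stated in full; the proofs are below) =====
def Claim_equal_result_to_hand : Prop := ∀ (opponent_hand : String) (result : String), Dom_result_to_hand opponent_hand result → Pre_result_to_hand opponent_hand result → Spec_result_to_hand opponent_hand result (result_to_hand opponent_hand result)

-- ===== LEMMAS AND PROOFS =====

-- ===== VERDICT (by name: the statement is the Claim_ definition above) =====
theorem result_to_hand_spec : Claim_equal_result_to_hand := by
  intro o r _ hpre
  unfold Spec_result_to_hand
  obtain ⟨hr, ho⟩ := hpre
  rcases hr with hr | hr | hr <;> subst hr
  · rcases ho with ho | ho | ho | ho <;> first | simp at ho | (subst ho; decide)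
  · rfl
  · rcases ho with ho | ho | ho | ho <;> first | simp at ho | (subst ho; decide)
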